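-- pv_equiv track=rewrite | github.com/ayberk/advent-of-code | 2024/day7.py | generate_operations
-- ===== SOURCE A (Python) =====
-- def generate_operations(num_operations, operands):
--     result = []
--
--     def dfs(remaining, current):
--         if remaining == 0:
--             result.append(current[:])
--             return
--         for op in operands:
--             current.append(op)
--             dfs(remaining - 1, current)
--             current.pop()
--
--     dfs(num_operations, [])
--     return result
-- ===== SOURCE B (Python) =====
-- def generate_operations(num_operations, operands):
--     result = [[]]
--     for _ in range(num_operations):
--         result = [prefix + [op] for prefix in result for op in operands]
--     return result
-- ===== Notes on version B (the rewrite author's own statement) =====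
-- stated objective: alternative
-- what changed: Replaces the recursive DFS with backtracking (append/recurse/pop on a shared list) by an iterative breadth-wise product: start from [[]] and num_operations times extend every prefix by every operand, preserving the DFS's lexicographic order.
-- outside the precondition, e.g. on generate_operations(-1, []): A returns [], B returns [[]]
import Mathlib
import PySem

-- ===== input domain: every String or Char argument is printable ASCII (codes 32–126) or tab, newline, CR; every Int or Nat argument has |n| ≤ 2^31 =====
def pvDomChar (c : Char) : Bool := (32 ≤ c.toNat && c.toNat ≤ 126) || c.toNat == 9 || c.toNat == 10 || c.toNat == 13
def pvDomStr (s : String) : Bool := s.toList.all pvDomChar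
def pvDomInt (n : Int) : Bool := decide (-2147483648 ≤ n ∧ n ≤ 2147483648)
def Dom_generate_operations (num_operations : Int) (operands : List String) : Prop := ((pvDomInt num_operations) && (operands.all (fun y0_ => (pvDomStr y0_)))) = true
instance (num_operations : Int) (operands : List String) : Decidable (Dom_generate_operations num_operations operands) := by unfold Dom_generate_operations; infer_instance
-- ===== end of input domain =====

-- B replaces A's recursive DFS with backtracking by an iterative breadth-wise product
-- (same output, same order); equivalence of the return values is proved on Pre_ (0 ≤ num_operations).

-- ===== PORT A =====
-- A's inner 'dfs': fuel is the (nonnegative, by Pre_) remaining count; the for-loop over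
-- operands appending each recursive batch to 'result' becomes a foldl accumulating with ++.
def generate_operations_dfs (operands : List String) : Nat → List String → List (List String)
  | 0, current => [current]
  | Nat.succ n, current =>
      operands.foldl (fun acc op => acc ++ generate_operations_dfs operands n (current ++ [op])) []

def generate_operations (num_operations : Int) (operands : List String) : List (List String) :=
  generate_operations_dfs operands num_operations.toNat []

-- ===== PORT B =====
-- one pass of B's list comprehension: [prefix + [op] for prefix in result for op in operands]
def generate_operations_step (operands : List String) (result : List (List String)) : List (List String) :=
  result.flatMap (fun pfx => operands.map (fun op => pfx ++ [op]))

def generate_operations_alt (num_operations : Int) (operands : List String) : List (List String) :=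
  (PySem.List.pyRange 0 num_operations 1).foldl
    (fun result _ => generate_operations_step operands result) [[]]

-- ===== PRECONDITION & SPEC =====
-- Pre_ excludes negative num_operations: there A's dfs raises RecursionError whenever operands
-- is nonempty, and with empty operands its accidental [] vs B's natural [[]] is a corner nobody
-- would specify (the function is only ever called with a nonnegative count).
def Pre_generate_operations (num_operations : Int) (operands : List String) : Prop :=
  0 ≤ num_operations
instance (num_operations : Int) (operands : List String) : Decidable (Pre_generate_operations num_operations operands) := by unfold Pre_generate_operations; infer_instance
def pvWitness_generate_operations : Int × List String := (2, ["+", "*"])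

def Spec_generate_operations (num_operations : Int) (operands : List String) (out : List (List String)) : Prop := out = generate_operations_alt num_operations operands
instance (num_operations : Int) (operands : List String) (out : List (List String)) : Decidable (Spec_generate_operations num_operations operands out) := by unfold Spec_generate_operations; infer_instance

-- ===== CLAIM (what is proved, stated in full; the proofs are below) =====
def Claim_equal_generate_operations : Prop := ∀ (num_operations : Int) (operands : List String), Dom_generate_operations num_operations operands → Pre_generate_operations num_operations operands → Spec_generate_operations num_operations operands (generate_operations num_operations operands)

-- ===== LEMMAS AND PROOFS =====

theorem map_eq_flatMap_singleton {α β : Type} (l : List α) (f : α → β) :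
    l.flatMap (fun x => [f x]) = l.map f := by
  induction l with
  | nil => rfl
  | cons a t ih => simp [ih]

-- one step distributes over flatMap
theorem step_flatMap {α : Type} (ops : List String) (l : List α) (f : α → List (List String)) :
    generate_operations_step ops (l.flatMap f)
      = l.flatMap (fun x => generate_operations_step ops (f x)) := by
  simp [generate_operations_step, List.flatMap_assoc]

theorem iterate_step_flatMap {α : Type} (ops : List String) (n : Nat) (l : List α)
    (f : α → List (List String)) :
    (generate_operations_step ops)^[n] (l.flatMap f)
      = l.flatMap (fun x => (generate_operations_step ops)^[n] (f x)) := by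
  induction n generalizing l f with
  | zero => simp
  | succ n ih =>
      rw [Function.iterate_succ_apply, step_flatMap, ih]
      simp [Function.iterate_succ_apply]

-- A's dfs computes n iterations of B's step starting from the singleton of the current prefix
theorem dfs_eq_iterate (ops : List String) (n : Nat) (current : List String) :
    generate_operations_dfs ops n current
      = (generate_operations_step ops)^[n] [current] := by
  induction n generalizing current with
  | zero => simp [generate_operations_dfs]
  | succ n ih =>
      rw [generate_operations_dfs, PySem.List.foldl_append_eq_flatMap, List.nil_append]
      have hstep : generate_operations_step ops [current]
          = ops.flatMap (fun op => [current ++ [op]]) := by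
        simp [generate_operations_step, map_eq_flatMap_singleton]
      rw [Function.iterate_succ_apply, hstep, iterate_step_flatMap]
      simp [ih]

-- a foldl that ignores the list's elements only iterates the step
theorem foldl_const_iterate (ops : List String) (l : List Int) (init : List (List String)) :
    l.foldl (fun result _ => generate_operations_step ops result) init
      = (generate_operations_step ops)^[l.length] init := by
  induction l generalizing init with
  | nil => rfl
  | cons x xs ih => simp [List.foldl_cons, ih, Function.iterate_succ_apply]

-- ===== VERDICT (by name: the statement is the Claim_ definition above) =====
theorem generate_operations_spec : Claim_equal_generate_operations := by
  intro n ops _hDom _hPre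
  unfold Spec_generate_operations generate_operations generate_operations_alt
  rw [foldl_const_iterate, PySem.List.length_pyRange_one, dfs_eq_iterate]
  norm_num
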